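-- pv_equiv track=rewrite | github.com/Murad9288/Problem_Solve_All_Oj | HackerRank.com/Waiter.py | waiter
-- ===== SOURCE A (Python) =====
-- def waiter(stack, q):
--     # Write your code here
--     p = []
--
--     def isprime(n):
--         for j in range(2, n):
--             if n % j == 0:
--                 return('no')
--         return('yes')
--     for i in range(2, 10000):
--         if (isprime(i)=='yes'):
--             p.append(i)
--     b = []
--     a = []
--     ans = []
--     for i in range(q):
--         while(stack):
--             poped = stack.pop()
--             if poped % p[i] == 0:
--                 b.append(poped)
--             else:
--                 a.append(poped)
--         while(b):
--             ele = b.pop()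
--             ans.append(ele)
--         stack = a
--         a = []
--     while(stack):
--         ans.append(stack.pop())
--     return(ans)
-- ===== SOURCE B (Python) =====
-- # B: prime list built by trial division against previously found primes up to sqrt(n)
-- # (instead of A's full trial division by every j < n), and each round done as a single
-- # partition pass with list comprehensions instead of A's three while/pop loops.
-- # Note: A empties its `stack` argument in place; B does not mutate it (return value equal).
--
-- def _has_small_factor(n, primes):
--     for p in primes:
--         if p * p > n:
--             return False
--         if n % p == 0:
--             return True
--     return False
--
--
-- def _gen_primes(limit):
--     primes = []
--     for n in range(2, limit):
--         if not _has_small_factor(n, primes):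
--             primes.append(n)
--     return primes
--
--
-- def waiter(stack, q):
--     primes = _gen_primes(10000)
--     cur = list(stack)
--     ans = []
--     for i in range(q):
--         if not cur:
--             break
--         p = primes[i]
--         ans += [x for x in cur if x % p == 0]
--         cur = [x for x in reversed(cur) if x % p != 0]
--     ans.extend(reversed(cur))
--     return ans
-- ===== Notes on version B (the rewrite author's own statement) =====
-- stated objective: faster
-- what changed: B builds the prime table by trial division against the already-found primes up to sqrt(n) (instead of A's trial division by every j < n), and performs each query round as a single partition pass with list comprehensions (plus an early break on an empty pile) instead of A's three while/pop loops; B also does not mutate the caller's stack.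
import Mathlib
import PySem

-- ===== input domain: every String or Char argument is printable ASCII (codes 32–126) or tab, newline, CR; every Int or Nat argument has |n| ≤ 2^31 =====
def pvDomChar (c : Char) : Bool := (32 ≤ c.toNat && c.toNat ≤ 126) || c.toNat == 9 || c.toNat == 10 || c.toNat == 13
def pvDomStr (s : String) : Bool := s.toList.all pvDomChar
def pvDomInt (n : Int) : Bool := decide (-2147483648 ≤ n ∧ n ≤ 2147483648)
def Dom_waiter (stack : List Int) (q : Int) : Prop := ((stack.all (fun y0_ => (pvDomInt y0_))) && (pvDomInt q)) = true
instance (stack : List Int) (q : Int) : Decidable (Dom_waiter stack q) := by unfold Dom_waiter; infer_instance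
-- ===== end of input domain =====

-- B replaces A's full trial division (every j < n) by trial division against the stored
-- primes up to sqrt(n), and does each round as one partition pass instead of three
-- while/pop loops.  Equivalence is about the RETURN value: Python A empties its `stack`
-- argument in place, B does not mutate it.

-- ===== PORT A =====
-- def isprime(n): for j in range(2, n): if n % j == 0: return 'no'; return 'yes'
def pvIsprime (n : Int) : String :=
  if (PySem.List.pyRange 2 n 1).any (fun j => PySem.Int.mod n j == 0) then "no" else "yes"

-- p = []; for i in range(2, 10000): if isprime(i)=='yes': p.append(i)
def pvPrimesA : List Int :=
  (PySem.List.pyRange 2 10000 1).foldl (fun p i => if pvIsprime i == "yes" then p ++ [i] else p) []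

-- one iteration of `for i in range(q)`: the two while/pop loops, state = (stack, ans)
def pvStepA (pl : List Int) (s : List Int × List Int) (i : Int) : List Int × List Int :=
  let p := PySem.List.pyGetD pl i 0   -- p[i]; default unreached under Pre_waiter
  -- while(stack): poped = stack.pop(); (b if poped % p == 0 else a).append(poped)
  let ba := s.1.reverse.foldl
      (fun (ba : List Int × List Int) x =>
        if PySem.Int.mod x p == 0 then (ba.1 ++ [x], ba.2) else (ba.1, ba.2 ++ [x]))
      ([], [])
  -- while(b): ans.append(b.pop())
  let ans := ba.1.reverse.foldl (fun a e => a ++ [e]) s.2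
  (ba.2, ans)    -- stack = a; a = []

def waiter (stack : List Int) (q : Int) : List Int :=
  let pl := pvPrimesA
  let st := (PySem.List.pyRange 0 q 1).foldl (pvStepA pl) (stack, [])
  -- while(stack): ans.append(stack.pop())
  st.1.reverse.foldl (fun a e => a ++ [e]) st.2

-- ===== PORT B =====
-- def _has_small_factor(n, primes): for p in primes: if p*p > n: return False; if n % p == 0: return True; return False
def pvHasSmallFactor (n : Int) : List Int → Bool
  | [] => false
  | p :: ps =>
      if n < p * p then false
      else if PySem.Int.mod n p == 0 then true
      else pvHasSmallFactor n ps

-- def _gen_primes(limit): primes = []; for n in range(2, limit): if not _has_small_factor(n, primes): primes.append(n)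
def pvGenPrimes (limit : Int) : List Int :=
  (PySem.List.pyRange 2 limit 1).foldl
    (fun primes n => if pvHasSmallFactor n primes then primes else primes ++ [n]) []

-- the `for i in range(q)` loop of B, with its early `break` on an empty pile
def pvAltGo (primes : List Int) : List Int → List Int × List Int → List Int × List Int
  | [], s => s
  | i :: is, (cur, ans) =>
      if cur = [] then (cur, ans)
      else
        let p := PySem.List.pyGetD primes i 0
        pvAltGo primes is
          (cur.reverse.filter (fun x => !(PySem.Int.mod x p == 0)),
           ans ++ cur.filter (fun x => PySem.Int.mod x p == 0))

def waiter_alt (stack : List Int) (q : Int) : List Int :=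
  let primes := pvGenPrimes 10000
  let s := pvAltGo primes (PySem.List.pyRange 0 q 1) (stack, [])
  s.2 ++ s.1.reverse

-- ===== PRECONDITION & SPEC =====
-- Pre_ excludes exactly the inputs on which A raises IndexError: q > 1229 together with a
-- stack element (such as ±1, or a number all of whose prime factors exceed 10000) that no
-- number in [2, 10000) divides, so it survives every round and A indexes past its list of
-- the 1229 primes below 10000.
def Pre_waiter (stack : List Int) (q : Int) : Prop :=
  q ≤ 1229 ∨ ∀ x ∈ stack, ∃ d ∈ PySem.List.pyRange 2 10000 1, PySem.Int.mod x d = 0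
instance (stack : List Int) (q : Int) : Decidable (Pre_waiter stack q) := by unfold Pre_waiter; infer_instance
def pvWitness_waiter : List Int × Int := ([4, 6, 3, 10], 2)
def Spec_waiter (stack : List Int) (q : Int) (out : List Int) : Prop := out = waiter_alt stack q
instance (stack : List Int) (q : Int) (out : List Int) : Decidable (Spec_waiter stack q out) := by unfold Spec_waiter; infer_instance

-- ===== CLAIM (what is proved, stated in full; the proofs are below) =====
def Claim_equal_waiter : Prop := ∀ (stack : List Int) (q : Int), Dom_waiter stack q → Pre_waiter stack q → Spec_waiter stack q (waiter stack q)

-- ===== LEMMAS AND PROOFS =====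

-- divisor in [2, n) ↔ n.toNat is not prime (the semantic core shared by both tests)
theorem pv_comp_iff (n : Int) (hn : 2 ≤ n) :
    (∃ j : Int, 2 ≤ j ∧ j < n ∧ j ∣ n) ↔ ¬ Nat.Prime n.toNat := by
  have hn' : n = (n.toNat : Int) := by omega
  constructor
  · rintro ⟨j, hj2, hjn, hdvd⟩ hp
    have hj' : j = (j.toNat : Int) := by omega
    have : j.toNat ∣ n.toNat := by
      rwa [hj', hn', Int.natCast_dvd_natCast] at hdvd
    have := (Nat.prime_def_lt.mp hp).2 j.toNat (by omega) this
    omega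
  · intro hnp
    rcases Nat.exists_dvd_of_not_prime2 (by omega) hnp with ⟨k, hk, hk2, hklt⟩
    exact ⟨(k : Int), by exact_mod_cast hk2, by omega, by rw [hn']; exact_mod_cast hk⟩

-- A's trial division by every j < n answers "is n prime" (as a Nat fact about n.toNat)
theorem pvIsprime_eq_yes (n : Int) (hn : 2 ≤ n) :
    (pvIsprime n == "yes") = decide (Nat.Prime n.toNat) := by
  have hA : ((PySem.List.pyRange 2 n 1).any (fun j => PySem.Int.mod n j == 0) = true)
      ↔ ¬ Nat.Prime n.toNat := by
    rw [List.any_eq_true]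
    constructor
    · rintro ⟨j, hj, hmod⟩
      rw [PySem.List.mem_pyRange_one] at hj
      exact (pv_comp_iff n hn).mp
        ⟨j, hj.1, hj.2, (PySem.Int.mod_eq_zero_iff_dvd n j).mp (by simpa using hmod)⟩
    · intro hnp
      rcases (pv_comp_iff n hn).mpr hnp with ⟨j, hj2, hjn, hdvd⟩
      exact ⟨j, PySem.List.mem_pyRange_one.mpr ⟨hj2, hjn⟩,
        by simpa using (PySem.Int.mod_eq_zero_iff_dvd n j).mpr hdvd⟩
  unfold pvIsprime
  by_cases h : (PySem.List.pyRange 2 n 1).any (fun j => PySem.Int.mod n j == 0) = true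
  · rw [if_pos h, show (("no" : String) == "yes") = false from by decide]
    simp [hA.mp h]
  · rw [if_neg h, show (("yes" : String) == "yes") = true from by decide]
    have hq : Nat.Prime n.toNat := by
      by_contra hnp
      exact h (hA.mpr hnp)
    simp [hq]

-- the break-loop of B, on a sorted list of numbers ≥ 2, finds a divisor ≤ √n iff one is listed
theorem pvHasSmallFactor_iff (n : Int) (l : List Int)
    (h2 : ∀ p ∈ l, 2 ≤ p) (hs : l.Pairwise (· < ·)) :
    pvHasSmallFactor n l = true ↔ ∃ p ∈ l, p * p ≤ n ∧ p ∣ n := by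
  induction l with
  | nil => simp [pvHasSmallFactor]
  | cons p ps ih =>
    have hp2 : 2 ≤ p := h2 p (List.mem_cons_self ..)
    have hlt : ∀ x ∈ ps, p < x := fun x hx => (List.pairwise_cons.mp hs).1 x hx
    rw [pvHasSmallFactor]
    by_cases hbig : n < p * p
    · rw [if_pos hbig]
      simp only [Bool.false_eq_true, false_iff]
      rintro ⟨x, hx, hxx, -⟩
      rcases List.mem_cons.mp hx with rfl | hx'
      · omega
      · have h1 : p < x := hlt x hx'
        have : p * p < x * x := by nlinarith
        omega
    · rw [if_neg hbig]
      by_cases hdvd : PySem.Int.mod n p == 0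
      · rw [if_pos hdvd]
        simp only [true_iff]
        exact ⟨p, List.mem_cons_self .., by omega,
          (PySem.Int.mod_eq_zero_iff_dvd n p).mp (by simpa using hdvd)⟩
      · rw [if_neg hdvd]
        rw [ih (fun x hx => h2 x (List.mem_cons_of_mem _ hx)) (List.pairwise_cons.mp hs).2]
        constructor
        · rintro ⟨x, hx, hxx, hd⟩; exact ⟨x, List.mem_cons_of_mem _ hx, hxx, hd⟩
        · rintro ⟨x, hx, hxx, hd⟩
          rcases List.mem_cons.mp hx with rfl | hx'
          · exact absurd (by simpa using (PySem.Int.mod_eq_zero_iff_dvd n x).mpr hd) hdvd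
          · exact ⟨x, hx', hxx, hd⟩

-- over the list of all primes in [2, n), B's test decides compositeness of n
theorem pvHasSmallFactor_primes (n : Int) (hn : 2 ≤ n) :
    pvHasSmallFactor n ((PySem.List.pyRange 2 n 1).filter (fun i => decide (Nat.Prime i.toNat)))
      = !decide (Nat.Prime n.toNat) := by
  have h2 : ∀ p ∈ (PySem.List.pyRange 2 n 1).filter (fun i => decide (Nat.Prime i.toNat)), 2 ≤ p := by
    intro p hp
    exact (PySem.List.mem_pyRange_one.mp (List.mem_of_mem_filter hp)).1
  have hs := (PySem.List.pairwise_lt_pyRange_one (a := 2) (b := n)).filter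
      (fun i => decide (Nat.Prime i.toNat))
  have hiff : pvHasSmallFactor n
        ((PySem.List.pyRange 2 n 1).filter (fun i => decide (Nat.Prime i.toNat))) = true
      ↔ ¬ Nat.Prime n.toNat := by
    rw [pvHasSmallFactor_iff n _ h2 hs]
    constructor
    · rintro ⟨p, hp, hpp, hdvd⟩
      have hmem := PySem.List.mem_pyRange_one.mp (List.mem_of_mem_filter hp)
      exact (pv_comp_iff n hn).mp ⟨p, hmem.1, hmem.2, hdvd⟩
    · intro hnp
      have hk : Nat.Prime n.toNat.minFac := Nat.minFac_prime (n := n.toNat) (by omega)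
      have hkd : n.toNat.minFac ∣ n.toNat := Nat.minFac_dvd n.toNat
      have hksq : n.toNat.minFac * n.toNat.minFac ≤ n.toNat := by
        have := Nat.minFac_sq_le_self (n := n.toNat) (by omega) hnp
        simpa [pow_two] using this
      have hk2 : 2 ≤ n.toNat.minFac := hk.two_le
      have hklt : n.toNat.minFac < n.toNat := by nlinarith
      have hsq' : ((n.toNat.minFac : Int)) * (n.toNat.minFac : Int) ≤ n := by
        have h1 : ((n.toNat.minFac * n.toNat.minFac : Nat) : Int) ≤ ((n.toNat : Nat) : Int) :=
          Int.ofNat_le.mpr hksq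
        push_cast at h1
        rwa [Int.toNat_of_nonneg (by omega : (0:Int) ≤ n)] at h1
      refine ⟨(n.toNat.minFac : Int), ?_, hsq', ?_⟩
      · refine List.mem_filter.mpr
          ⟨PySem.List.mem_pyRange_one.mpr ⟨by exact_mod_cast hk2, by omega⟩, ?_⟩
        simpa using hk
      · have hd : (n.toNat.minFac : Int) ∣ (n.toNat : Int) := Int.natCast_dvd_natCast.mpr hkd
        have hn' : ((n.toNat : Nat) : Int) = n := by omega
        rwa [hn'] at hd
  cases hX : pvHasSmallFactor n
      ((PySem.List.pyRange 2 n 1).filter (fun i => decide (Nat.Prime i.toNat))) with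
  | true => simp [hiff.mp hX]
  | false =>
    have hq : Nat.Prime n.toNat := by
      by_contra hnp
      have := hiff.mpr hnp
      rw [hX] at this
      exact Bool.false_ne_true this
    simp [hq]

-- both prime generators produce the primes of [2, b)
theorem pvGenPrimes_eq_filter (b : Int) (hb : 2 ≤ b) :
    pvGenPrimes b = (PySem.List.pyRange 2 b 1).filter (fun i => decide (Nat.Prime i.toNat)) := by
  induction b, hb using Int.le_induction with
  | base => rw [pvGenPrimes, PySem.List.pyRange_one_eq_nil (by omega)]; rfl
  | succ b hb ih =>
    rw [pvGenPrimes, PySem.List.pyRange_one_succ_right (by omega), List.foldl_append,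
      List.filter_append]
    show (if pvHasSmallFactor b (pvGenPrimes b) then pvGenPrimes b else pvGenPrimes b ++ [b]) = _
    rw [ih, pvHasSmallFactor_primes b hb]
    rcases Bool.eq_false_or_eq_true (decide (Nat.Prime b.toNat)) with hp | hp <;>
      rw [hp] <;> simp [hp]

theorem pvPrimesA_eq : pvPrimesA = pvGenPrimes 10000 := by
  rw [pvPrimesA, PySem.List.foldl_append_if_eq_filter, List.nil_append,
    pvGenPrimes_eq_filter 10000 (by omega)]
  refine List.filter_congr ?_
  intro i hi
  exact pvIsprime_eq_yes i (PySem.List.mem_pyRange_one.mp hi).1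

-- one A-round equals one B-round
theorem pvStepA_eq (pl : List Int) (cur ans : List Int) (i : Int) :
    pvStepA pl (cur, ans) i =
      (cur.reverse.filter (fun x => !(PySem.Int.mod x (PySem.List.pyGetD pl i 0) == 0)),
       ans ++ cur.filter (fun x => PySem.Int.mod x (PySem.List.pyGetD pl i 0) == 0)) := by
  simp only [pvStepA]
  generalize PySem.List.pyGetD pl i 0 = p
  have hsplit :
      cur.reverse.foldl
        (fun (ba : List Int × List Int) x =>
          if PySem.Int.mod x p == 0 then (ba.1 ++ [x], ba.2) else (ba.1, ba.2 ++ [x]))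
        ([], [])
      = (cur.reverse.foldl (fun b y => if PySem.Int.mod y p == 0 then b ++ [y] else b) [],
         cur.reverse.foldl (fun a y => if !(PySem.Int.mod y p == 0) then a ++ [y] else a) []) := by
    rw [show (fun (ba : List Int × List Int) x =>
          if PySem.Int.mod x p == 0 then (ba.1 ++ [x], ba.2) else (ba.1, ba.2 ++ [x]))
        = fun ba x =>
          ((fun b y => if PySem.Int.mod y p == 0 then b ++ [y] else b) ba.1 x,
           (fun a y => if !(PySem.Int.mod y p == 0) then a ++ [y] else a) ba.2 x) from by
      funext ba x
      rcases Bool.eq_false_or_eq_true (PySem.Int.mod x p == 0) with h | h <;> simp [h]]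
    exact PySem.List.foldl_prod_mk
      (fun b y => if PySem.Int.mod y p == 0 then b ++ [y] else b)
      (fun a y => if !(PySem.Int.mod y p == 0) then a ++ [y] else a) cur.reverse [] []
  rw [hsplit, PySem.List.foldl_append_if_eq_filter, PySem.List.foldl_append_if_eq_filter]
  simp only [List.nil_append, PySem.List.foldl_append_singleton]
  simp [List.filter_reverse]

theorem pvStepA_nil (pl : List Int) (is : List Int) (ans : List Int) :
    is.foldl (pvStepA pl) ([], ans) = ([], ans) := by
  induction is generalizing ans with
  | nil => rfl
  | cons i is ih => rw [List.foldl_cons, pvStepA_eq]; simpa using ih ans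

theorem pvFold_eq_go (pl : List Int) (is : List Int) (cur ans : List Int) :
    is.foldl (pvStepA pl) (cur, ans) = pvAltGo pl is (cur, ans) := by
  induction is generalizing cur ans with
  | nil => rfl
  | cons i is ih =>
    rw [List.foldl_cons, pvStepA_eq, pvAltGo]
    by_cases h : cur = []
    · subst h; simpa using pvStepA_nil pl is ans
    · rw [if_neg h]; exact ih _ _

-- ===== VERDICT (by name: the statement is the Claim_ definition above) =====
theorem waiter_spec : Claim_equal_waiter := by
  intro stack q _ _
  show waiter stack q = waiter_alt stack q
  simp only [waiter, waiter_alt, pvPrimesA_eq, pvFold_eq_go,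
    PySem.List.foldl_append_singleton]
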